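-- pv_equiv track=rewrite | github.com/dineshk-l/folding-project | main2.py | find_min_fold
-- ===== SOURCE A (Python) =====
-- def opposite(s, i, j):
--     for n in range(i-1, j - 1, -1):
--         if s[n-1] == s[i+(i-n)-1]:
--             return False
--     return True
--
-- def find_min_fold(s):
--     n = len(s) + 1
--     if n == 1:
--         return[0]
--     fold = [n] * n
--     fold[0] = 0
--     fold[1] = 1
--     for i in range(2,len(s)+1):
--         new_min = fold[i-1] + 1
--         for j in range(i-1,0,-1):
--             if (i-j+i<n):
--                 if  opposite(s, i, j):
--                     new_min = min(new_min, fold[j-1]+1)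
--             fold[i] = new_min
--     return fold
-- ===== SOURCE B (Python) =====
-- def find_min_fold(s):
--     L = len(s)
--     if L == 0:
--         return [0]
--     fold = [0, 1]
--     for i in range(2, L + 1):
--         jlow = max(1, 2 * i - L)
--         # one outward scan: last position in [jlow, i-1] whose mirror about i matches
--         m = jlow - 1
--         for k in range(jlow, i):
--             if s[k - 1] == s[2 * i - k - 1]:
--                 m = k
--         best = fold[i - 1] + 1
--         for j in range(m + 1, i):
--             best = min(best, fold[j - 1] + 1)
--         fold.append(best)
--     return fold
-- ===== Notes on version B (the rewrite author's own statement) =====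
-- stated objective: faster
-- what changed: Replaced the O(n) rescans of opposite() for every (i,j) pair by one outward mirror scan per center i that finds the largest mismatch-blocking position m, so the valid folds are exactly j in [m+1, i-1] and fold[i] is a single range-min over that interval; the DP list is grown by append instead of preallocated and overwritten.
import Mathlib
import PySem

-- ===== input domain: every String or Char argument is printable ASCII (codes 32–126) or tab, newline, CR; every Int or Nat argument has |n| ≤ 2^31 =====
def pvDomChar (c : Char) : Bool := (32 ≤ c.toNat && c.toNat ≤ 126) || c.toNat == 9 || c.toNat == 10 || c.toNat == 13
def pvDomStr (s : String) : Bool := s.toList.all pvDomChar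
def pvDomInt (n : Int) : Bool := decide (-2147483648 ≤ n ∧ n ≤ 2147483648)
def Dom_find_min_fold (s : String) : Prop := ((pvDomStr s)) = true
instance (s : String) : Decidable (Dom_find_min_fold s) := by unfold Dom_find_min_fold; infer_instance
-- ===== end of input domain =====

-- B replaces A's per-(i,j) rescans of opposite() by one mirror scan per center i plus a
-- range-min over the valid fold points (a faster algorithm; equal return value proved below).

-- ===== PORT A =====
def oppositeGo (cs : List Char) (i : Int) : List Int → Bool
  | [] => true
  | n :: rest =>
    if PySem.List.pyGet? cs (n-1) == PySem.List.pyGet? cs (i+(i-n)-1) then false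
    else oppositeGo cs i rest

def opposite (cs : List Char) (i j : Int) : Bool :=
  oppositeGo cs i (PySem.List.pyRange (i-1) (j-1) (-1))

def find_min_fold (s : String) : List Int :=
  let cs := s.toList
  let n : Int := PySem.List.len cs + 1
  if n == 1 then [0]
  else
    let fold : List Int := PySem.List.pyRepeat [n] n
    let fold := PySem.List.pySetD fold 0 0
    let fold := PySem.List.pySetD fold 1 1
    (PySem.List.pyRange 2 (PySem.List.len cs + 1) 1).foldl (fun fold i =>
      let new_min := PySem.List.pyGetD fold (i-1) 0 + 1
      let st := (PySem.List.pyRange (i-1) 0 (-1)).foldl (fun (st : Int × List Int) j =>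
        let nm := if i - j + i < n then
                    (if opposite cs i j then min st.1 (PySem.List.pyGetD st.2 (j-1) 0 + 1) else st.1)
                  else st.1
        (nm, PySem.List.pySetD st.2 i nm)) (new_min, fold)
      st.2) fold

-- ===== PORT B =====
def find_min_fold_alt (s : String) : List Int :=
  let cs := s.toList
  let L : Int := PySem.List.len cs
  if L == 0 then [0]
  else
    (PySem.List.pyRange 2 (L+1) 1).foldl (fun fold i =>
      let jlow := max 1 (2*i - L)
      let m := (PySem.List.pyRange jlow i 1).foldl (fun m k =>
        if PySem.List.pyGet? cs (k-1) == PySem.List.pyGet? cs (2*i-k-1) then k else m) (jlow - 1)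
      let best := PySem.List.pyGetD fold (i-1) 0 + 1
      let best := (PySem.List.pyRange (m+1) i 1).foldl (fun b j => min b (PySem.List.pyGetD fold (j-1) 0 + 1)) best
      fold ++ [best]) [0, 1]

-- ===== PRECONDITION & SPEC =====
def Spec_find_min_fold (s : String) (out : List Int) : Prop := out = find_min_fold_alt s
instance (s : String) (out : List Int) : Decidable (Spec_find_min_fold s out) := by unfold Spec_find_min_fold; infer_instance

-- ===== CLAIM (what is proved, stated in full; the proofs are below) =====
def Claim_equal_find_min_fold : Prop := ∀ (s : String), Dom_find_min_fold s → Spec_find_min_fold s (find_min_fold s)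

-- ===== LEMMAS AND PROOFS =====

lemma pyGetD_nonneg (xs : List Int) (i d : Int) (h : 0 ≤ i) :
    PySem.List.pyGetD xs i d = xs.getD i.toNat d := by
  simp [PySem.List.pyGetD, PySem.List.pyGet?_of_nonneg xs h, List.getD]

lemma pyGetD_set_ne (xs : List Int) (i j v d : Int) (h0 : 0 ≤ j) (hj : j < i) :
    PySem.List.pyGetD (PySem.List.pySetD xs i v) j d = PySem.List.pyGetD xs j d := by
  rw [PySem.List.pySetD_of_nonneg xs v (by omega), pyGetD_nonneg _ _ _ h0, pyGetD_nonneg _ _ _ h0,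
      List.getD, List.getD, List.getElem?_set_ne (by omega)]

lemma pySetD_pySetD (xs : List Int) (i v w : Int) (h : 0 ≤ i) :
    PySem.List.pySetD (PySem.List.pySetD xs i v) i w = PySem.List.pySetD xs i w := by
  rw [PySem.List.pySetD_of_nonneg xs v h, PySem.List.pySetD_of_nonneg _ w h,
      PySem.List.pySetD_of_nonneg xs w h, List.set_set]

lemma pyGetD_append_left (xs pad : List Int) (t d : Int) (h0 : 0 ≤ t) (h : t.toNat < xs.length) :
    PySem.List.pyGetD (xs ++ pad) t d = PySem.List.pyGetD xs t d := by
  rw [pyGetD_nonneg _ _ _ h0, pyGetD_nonneg _ _ _ h0, List.getD, List.getD,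
      List.getElem?_append_left h]

def pvCond (cs : List Char) (i k : Int) : Bool :=
  PySem.List.pyGet? cs (k-1) == PySem.List.pyGet? cs (2*i-k-1)

lemma oppositeGo_eq_any (cs : List Char) (i : Int) (l : List Int) :
    oppositeGo cs i l = !(l.any (pvCond cs i)) := by
  induction l with
  | nil => rfl
  | cons n rest ih =>
    have h : i + (i - n) - 1 = 2*i - n - 1 := by ring
    simp only [oppositeGo, h, List.any_cons, pvCond]
    by_cases hc : (PySem.List.pyGet? cs (n-1) == PySem.List.pyGet? cs (2*i-n-1)) = true
    · simp [hc]
    · simp only [Bool.not_eq_true] at hc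
      simp [hc, ih]

lemma opposite_true_iff (cs : List Char) (i j : Int) :
    opposite cs i j = true ↔ ∀ k : Int, j ≤ k → k ≤ i - 1 → pvCond cs i k = false := by
  rw [opposite, oppositeGo_eq_any]
  simp only [Bool.not_eq_eq_eq_not, Bool.not_true, List.any_eq_false]
  constructor
  · intro h k hk1 hk2
    simpa using h k (PySem.List.mem_pyRange_neg_one.mpr ⟨by omega, by omega⟩)
  · intro h k hk
    obtain ⟨h1, h2⟩ := PySem.List.mem_pyRange_neg_one.mp hk
    simpa using h k (by omega) (by omega)

def pvScanStep (p : Int → Bool) (m k : Int) : Int := if p k then k else m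

lemma scan_spec (p : Int → Bool) (a : Int) (t : Nat) :
    a - 1 ≤ (PySem.List.pyRange a (a + t) 1).foldl (pvScanStep p) (a - 1) ∧
    (PySem.List.pyRange a (a + t) 1).foldl (pvScanStep p) (a - 1) ≤ a + t - 1 ∧
    ((PySem.List.pyRange a (a + t) 1).foldl (pvScanStep p) (a - 1) = a - 1 ∨
      p ((PySem.List.pyRange a (a + t) 1).foldl (pvScanStep p) (a - 1)) = true) ∧
    ∀ k, (PySem.List.pyRange a (a + t) 1).foldl (pvScanStep p) (a - 1) < k → k ≤ a + t - 1 → p k = false := by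
  induction t with
  | zero =>
    rw [show a + ((0:Nat):Int) = a by omega, PySem.List.pyRange_one_eq_nil (le_refl a)]
    simp only [List.foldl_nil]
    exact ⟨le_refl _, by omega, by simp, fun k h1 h2 => by omega⟩
  | succ t ih =>
    have hsplit : PySem.List.pyRange a (a + ((t:Int)+1)) 1 = PySem.List.pyRange a (a + t) 1 ++ [a + t] := by
      rw [show a + ((t:Int)+1) = (a + t) + 1 by ring]
      exact PySem.List.pyRange_one_succ_right (by omega)
    rw [show ((t+1:Nat):Int) = (t:Int)+1 by push_cast; ring, hsplit, List.foldl_append]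
    simp only [List.foldl_cons, List.foldl_nil]
    obtain ⟨ih1, ih2, ih3, ih4⟩ := ih
    by_cases hp : p (a + t) = true
    · rw [show pvScanStep p ((PySem.List.pyRange a (a + t) 1).foldl (pvScanStep p) (a - 1)) (a+t) = a + t from by
        simp [pvScanStep, hp]]
      exact ⟨by omega, by omega, Or.inr hp, fun k h1 h2 => by omega⟩
    · rw [show pvScanStep p ((PySem.List.pyRange a (a + t) 1).foldl (pvScanStep p) (a - 1)) (a+t)
          = (PySem.List.pyRange a (a + t) 1).foldl (pvScanStep p) (a - 1) from by
        simp [pvScanStep, hp]]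
      refine ⟨ih1, by omega, ih3, ?_⟩
      intro k h1 h2
      rcases lt_or_ge (a + t - 1) k with hk | hk
      · have hke : k = a + t := by omega
        subst hke; simpa using hp
      · exact ih4 k h1 hk

lemma filter_pyRange_gt : ∀ (t : Nat) (a b m : Int), a ≤ m + 1 → (b - a).toNat ≤ t →
    (PySem.List.pyRange a b 1).filter (fun j => decide (m < j)) = PySem.List.pyRange (m+1) b 1 := by
  intro t
  induction t with
  | zero =>
    intro a b m h1 h2
    rw [PySem.List.pyRange_one_eq_nil (by omega), PySem.List.pyRange_one_eq_nil (by omega)]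
    rfl
  | succ t ih =>
    intro a b m h1 h2
    by_cases hab : b ≤ a
    · rw [PySem.List.pyRange_one_eq_nil hab, PySem.List.pyRange_one_eq_nil (by omega)]; rfl
    · by_cases hma : m < a
      · have hself : (PySem.List.pyRange a b 1).filter (fun j => decide (m < j)) = PySem.List.pyRange a b 1 := by
          apply List.filter_eq_self.mpr
          intro x hx
          have hm := PySem.List.mem_pyRange_one.mp hx
          simp only [decide_eq_true_eq]; omega
        rw [hself, show m + 1 = a by omega]
      · rw [PySem.List.pyRange_one_cons (by omega), List.filter_cons]
        rw [if_neg (by simpa using hma)]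
        exact ih (a+1) b m (by omega) (by omega)

lemma condA_iff (cs : List Char) (L i j r : Int) (h2 : 2 ≤ i) (hiL : i ≤ L)
    (hj1 : 1 ≤ j) (hji : j ≤ i - 1)
    (hr : r = (PySem.List.pyRange (max 1 (2*i-L)) i 1).foldl (pvScanStep (pvCond cs i)) (max 1 (2*i-L) - 1)) :
    ((i - j + i < L + 1 ∧ opposite cs i j = true) ↔ r < j) := by
  have hjl1 : (1:Int) ≤ max 1 (2*i-L) := le_max_left _ _
  have hjli : max 1 (2*i-L) ≤ i := by
    apply max_le (by omega) (by omega)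
  have ht : i = max 1 (2*i-L) + ((i - max 1 (2*i-L)).toNat : Int) := by omega
  obtain ⟨hs1, hs2, hs3, hs4⟩ := scan_spec (pvCond cs i) (max 1 (2*i-L)) (i - max 1 (2*i-L)).toNat
  rw [← ht] at hs1 hs2 hs3 hs4
  rw [← hr] at hs1 hs2 hs3 hs4
  rw [opposite_true_iff]
  constructor
  · rintro ⟨hcond, hopp⟩
    by_contra hrj
    push Not at hrj
    have hrge : max 1 (2*i-L) ≤ r := by omega
    have hpr : pvCond cs i r = true := by
      rcases hs3 with h | h
      · omega
      · exact h
    have := hopp r (by omega) (by omega)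
    rw [this] at hpr; exact absurd hpr (by simp)
  · intro hrj
    have hjlow : max 1 (2*i-L) ≤ j := by omega
    refine ⟨by omega, ?_⟩
    intro k hk1 hk2
    exact hs4 k (by omega) (by omega)

def pvStepA (cs : List Char) (n i : Int) (st : Int × List Int) (j : Int) : Int × List Int :=
  let nm := if i - j + i < n then
              (if opposite cs i j then min st.1 (PySem.List.pyGetD st.2 (j-1) 0 + 1) else st.1)
            else st.1
  (nm, PySem.List.pySetD st.2 i nm)

def pvG (cs : List Char) (n i : Int) (fd : List Int) (nm : Int) (l : List Int) : Int :=
  l.foldl (fun nm j => if i - j + i < n then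
      (if opposite cs i j then min nm (PySem.List.pyGetD fd (j-1) 0 + 1) else nm) else nm) nm

lemma innerA_inv (cs : List Char) (n i : Int) (hi : 0 ≤ i) :
    ∀ (l : List Int) (nm : Int) (fd : List Int), (∀ j ∈ l, 1 ≤ j ∧ j ≤ i - 1) →
    l.foldl (pvStepA cs n i) (nm, PySem.List.pySetD fd i nm)
      = (pvG cs n i fd nm l, PySem.List.pySetD fd i (pvG cs n i fd nm l)) := by
  intro l
  induction l with
  | nil => intro nm fd _; simp [pvG]
  | cons j rest ih =>
    intro nm fd hall
    obtain ⟨hj1, hji⟩ := hall j (List.mem_cons_self ..)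
    have hread : PySem.List.pyGetD (PySem.List.pySetD fd i nm) (j-1) 0 = PySem.List.pyGetD fd (j-1) 0 :=
      pyGetD_set_ne fd i (j-1) nm 0 (by omega) (by omega)
    have hstep : pvStepA cs n i (nm, PySem.List.pySetD fd i nm) j
        = (pvG cs n i fd nm [j], PySem.List.pySetD fd i (pvG cs n i fd nm [j])) := by
      simp only [pvStepA, pvG, List.foldl_cons, List.foldl_nil, hread]
      rw [pySetD_pySetD fd i nm _ hi]
    rw [List.foldl_cons, hstep, ih _ fd (fun x hx => hall x (List.mem_cons_of_mem _ hx))]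
    have : pvG cs n i fd (pvG cs n i fd nm [j]) rest = pvG cs n i fd nm (j :: rest) := by
      simp only [pvG, List.foldl_cons, List.foldl_nil]
    rw [this]

lemma innerA_run (cs : List Char) (n i : Int) (hi : 0 ≤ i)
    (l : List Int) (hne : l ≠ []) (hall : ∀ j ∈ l, 1 ≤ j ∧ j ≤ i - 1) (nm : Int) (fd : List Int) :
    l.foldl (pvStepA cs n i) (nm, fd)
      = (pvG cs n i fd nm l, PySem.List.pySetD fd i (pvG cs n i fd nm l)) := by
  cases l with
  | nil => exact absurd rfl hne
  | cons j rest =>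
    have hstep : pvStepA cs n i (nm, fd) j
        = (pvG cs n i fd nm [j], PySem.List.pySetD fd i (pvG cs n i fd nm [j])) := by
      simp only [pvStepA, pvG, List.foldl_cons, List.foldl_nil]
    rw [List.foldl_cons, hstep, innerA_inv cs n i hi rest _ fd (fun x hx => hall x (List.mem_cons_of_mem _ hx))]
    have : pvG cs n i fd (pvG cs n i fd nm [j]) rest = pvG cs n i fd nm (j :: rest) := by
      simp only [pvG, List.foldl_cons, List.foldl_nil]
    rw [this]

lemma foldl_min_reverse (c : Int → Int) (l : List Int) (a : Int) :
    l.reverse.foldl (fun b j => min b (c j)) a = l.foldl (fun b j => min b (c j)) a := by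
  have : RightCommutative (fun (b : Int) j => min b (c j)) :=
    RightCommutative.mk (fun a x y => by simp [min_assoc, min_comm (c x)])
  exact (l.reverse_perm).foldl_eq a

lemma pvG_eq_best (cs : List Char) (L i r : Int) (h2 : 2 ≤ i) (hiL : i ≤ L)
    (hr : r = (PySem.List.pyRange (max 1 (2*i-L)) i 1).foldl (pvScanStep (pvCond cs i)) (max 1 (2*i-L) - 1))
    (fd : List Int) (nm : Int) :
    pvG cs (L+1) i fd nm (PySem.List.pyRange (i-1) 0 (-1))
      = (PySem.List.pyRange (r+1) i 1).foldl (fun b j => min b (PySem.List.pyGetD fd (j-1) 0 + 1)) nm := by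
  have hr0 : 0 ≤ r := by
    have hjl1 : (1:Int) ≤ max 1 (2*i-L) := le_max_left _ _
    have hjli : max 1 (2*i-L) ≤ i := max_le (by omega) (by omega)
    have ht : i = max 1 (2*i-L) + ((i - max 1 (2*i-L)).toNat : Int) := by omega
    obtain ⟨hs1, _, _, _⟩ := scan_spec (pvCond cs i) (max 1 (2*i-L)) (i - max 1 (2*i-L)).toNat
    rw [← ht, ← hr] at hs1
    omega
  have hcongr : pvG cs (L+1) i fd nm (PySem.List.pyRange (i-1) 0 (-1))
      = (PySem.List.pyRange (i-1) 0 (-1)).foldl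
          (fun nm j => if r < j then min nm (PySem.List.pyGetD fd (j-1) 0 + 1) else nm) nm := by
    unfold pvG
    apply PySem.List.foldl_congr_mem
    intro acc j hj
    obtain ⟨hj0, hji⟩ := PySem.List.mem_pyRange_neg_one.mp hj
    have hiff := condA_iff cs L i j r h2 hiL (by omega) (by omega) hr
    by_cases hrj : r < j
    · obtain ⟨hc1, hc2⟩ := hiff.mpr hrj
      rw [if_pos hc1, if_pos hc2, if_pos hrj]
    · rw [if_neg hrj]
      split_ifs with hA hB
      · exact absurd (hiff.mp ⟨hA, hB⟩) hrj
      · rfl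
      · rfl
  rw [hcongr, PySem.List.foldl_ite_eq_foldl_filter (fun j => r < j)
        (fun nm j => min nm (PySem.List.pyGetD fd (j-1) 0 + 1))]
  have hrev : PySem.List.pyRange (i-1) 0 (-1) = (PySem.List.pyRange 1 i 1).reverse := by
    rw [PySem.List.pyRange_neg_one_eq_reverse]
    norm_num
  rw [hrev, List.filter_reverse,
      filter_pyRange_gt (i-1).toNat 1 i r (by omega) (by omega),
      foldl_min_reverse]

def pvStepAO (cs : List Char) (n : Int) (fold : List Int) (i : Int) : List Int :=
  let new_min := PySem.List.pyGetD fold (i-1) 0 + 1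
  let st := (PySem.List.pyRange (i-1) 0 (-1)).foldl (pvStepA cs n i) (new_min, fold)
  st.2

def pvStepBO (cs : List Char) (L : Int) (fold : List Int) (i : Int) : List Int :=
  let jlow := max 1 (2*i - L)
  let m := (PySem.List.pyRange jlow i 1).foldl (pvScanStep (pvCond cs i)) (jlow - 1)
  let best := PySem.List.pyGetD fold (i-1) 0 + 1
  let best := (PySem.List.pyRange (m+1) i 1).foldl (fun b j => min b (PySem.List.pyGetD fold (j-1) 0 + 1)) best
  fold ++ [best]

lemma step_eq (cs : List Char) (L i : Int) (h2 : 2 ≤ i) (hiL : i ≤ L)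
    (Bfd : List Int) (hlen : Bfd.length = i.toNat) :
    pvStepAO cs (L+1) (Bfd ++ List.replicate ((L+1-i).toNat) (L+1)) i
      = pvStepBO cs L Bfd i ++ List.replicate ((L+1-(i+1)).toNat) (L+1) := by
  set fd := Bfd ++ List.replicate ((L+1-i).toNat) (L+1) with hfd
  set r := (PySem.List.pyRange (max 1 (2*i-L)) i 1).foldl (pvScanStep (pvCond cs i)) (max 1 (2*i-L) - 1) with hrdef
  have hr0 : 0 ≤ r := by
    have hjl1 : (1:Int) ≤ max 1 (2*i-L) := le_max_left _ _
    have hjli : max 1 (2*i-L) ≤ i := max_le (by omega) (by omega)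
    have ht : i = max 1 (2*i-L) + ((i - max 1 (2*i-L)).toNat : Int) := by omega
    obtain ⟨hs1, _, _, _⟩ := scan_spec (pvCond cs i) (max 1 (2*i-L)) (i - max 1 (2*i-L)).toNat
    rw [← ht, ← hrdef] at hs1
    omega
  have hne : PySem.List.pyRange (i-1) 0 (-1) ≠ [] := by
    rw [PySem.List.pyRange_neg_one_cons (by omega)]; simp
  have hall : ∀ j ∈ PySem.List.pyRange (i-1) 0 (-1), 1 ≤ j ∧ j ≤ i - 1 := by
    intro j hj
    obtain ⟨h1, h2⟩ := PySem.List.mem_pyRange_neg_one.mp hj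
    omega
  have hreadinit : PySem.List.pyGetD fd (i-1) 0 = PySem.List.pyGetD Bfd (i-1) 0 :=
    pyGetD_append_left Bfd _ (i-1) 0 (by omega) (by omega)
  show ((PySem.List.pyRange (i-1) 0 (-1)).foldl (pvStepA cs (L+1) i)
      (PySem.List.pyGetD fd (i-1) 0 + 1, fd)).2
    = pvStepBO cs L Bfd i ++ List.replicate ((L+1-(i+1)).toNat) (L+1)
  rw [innerA_run cs (L+1) i (by omega) _ hne hall]
  simp only
  rw [pvG_eq_best cs L i r h2 hiL hrdef fd _]
  have hreads : (PySem.List.pyRange (r+1) i 1).foldl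
        (fun b j => min b (PySem.List.pyGetD fd (j-1) 0 + 1)) (PySem.List.pyGetD fd (i-1) 0 + 1)
      = (PySem.List.pyRange (r+1) i 1).foldl
        (fun b j => min b (PySem.List.pyGetD Bfd (j-1) 0 + 1)) (PySem.List.pyGetD Bfd (i-1) 0 + 1) := by
    rw [hreadinit]
    apply PySem.List.foldl_congr_mem
    intro acc j hj
    obtain ⟨h1, h2⟩ := PySem.List.mem_pyRange_one.mp hj
    rw [pyGetD_append_left Bfd _ (j-1) 0 (by omega) (by omega)]
  rw [hreads]
  set best := (PySem.List.pyRange (r+1) i 1).foldl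
        (fun b j => min b (PySem.List.pyGetD Bfd (j-1) 0 + 1)) (PySem.List.pyGetD Bfd (i-1) 0 + 1) with hbest
  have hsetgoal : PySem.List.pySetD fd i best = Bfd ++ best :: List.replicate ((L+1-(i+1)).toNat) (L+1) := by
    rw [PySem.List.pySetD_of_nonneg fd best (by omega), hfd]
    have hk : (L+1-i).toNat = (L+1-(i+1)).toNat + 1 := by omega
    rw [hk, List.replicate_succ]
    have hi : i.toNat = Bfd.length := hlen.symm
    rw [hi]
    simp
  rw [hsetgoal, pvStepBO]
  simp only [← hrdef, ← hbest]
  simp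

lemma pvStepBO_len (cs : List Char) (L : Int) (fold : List Int) (i : Int) :
    (pvStepBO cs L fold i).length = fold.length + 1 := by
  simp [pvStepBO]

lemma outer (cs : List Char) (L : Int) (hL1 : 1 ≤ L) : ∀ (t : Nat), (t : Int) ≤ L - 1 →
    (PySem.List.pyRange 2 (2 + (t:Int)) 1).foldl (pvStepAO cs (L+1))
        (PySem.List.pySetD (PySem.List.pySetD (PySem.List.pyRepeat [L+1] (L+1)) 0 0) 1 1)
      = (PySem.List.pyRange 2 (2 + (t:Int)) 1).foldl (pvStepBO cs L) [0, 1]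
          ++ List.replicate ((L+1-(2+(t:Int))).toNat) (L+1) ∧
    ((PySem.List.pyRange 2 (2 + (t:Int)) 1).foldl (pvStepBO cs L) [0, 1]).length = (2+(t:Int)).toNat := by
  intro t
  induction t with
  | zero =>
    intro _
    rw [show (2 + ((0:Nat):Int)) = 2 by omega, PySem.List.pyRange_one_eq_nil (le_refl 2)]
    simp only [List.foldl_nil]
    constructor
    · rw [PySem.List.pyRepeat_singleton]
      have hk : (L+1).toNat = (L-1).toNat + 2 := by omega
      rw [hk, List.replicate_succ, List.replicate_succ,
          PySem.List.pySetD_of_nonneg _ (0:Int) (by omega),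
          PySem.List.pySetD_of_nonneg _ (1:Int) (by omega)]
      simp
      omega
    · simp
  | succ t ih =>
    intro ht
    obtain ⟨ih1, ih2⟩ := ih (by omega)
    have hsplit : PySem.List.pyRange 2 (2 + ((t:Int)+1)) 1
        = PySem.List.pyRange 2 (2 + (t:Int)) 1 ++ [2 + (t:Int)] := by
      rw [show (2 + ((t:Int)+1)) = (2 + (t:Int)) + 1 by ring]
      exact PySem.List.pyRange_one_succ_right (by omega)
    rw [show ((t+1:Nat):Int) = (t:Int)+1 by push_cast; ring, hsplit, List.foldl_append,
        List.foldl_append]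
    simp only [List.foldl_cons, List.foldl_nil]
    rw [ih1]
    have hstep := step_eq cs L (2 + (t:Int)) (by omega) (by omega) _ (by rw [ih2])
    rw [show (L+1-(2+(t:Int))).toNat = (L+1-(2+(t:Int))).toNat from rfl] at hstep
    constructor
    · rw [hstep]
      have : (L+1-((2+(t:Int))+1)).toNat = (L+1-(2+((t:Int)+1))).toNat := by omega
      rw [this]
    · rw [pvStepBO_len, ih2]
      omega

lemma ports_agree (s : String) : find_min_fold s = find_min_fold_alt s := by
  by_cases h0 : s.toList.length = 0
  · show (if ((((s.toList.length : Int)) + 1 == 1) = true) then _ else _)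
        = (if (((s.toList.length : Int) == 0) = true) then _ else _)
    rw [if_pos (by simp [h0]), if_pos (by simp [h0])]
  · have hL1 : 1 ≤ (s.toList.length : Int) := by omega
    show (if ((((s.toList.length : Int)) + 1 == 1) = true) then [0] else
          (PySem.List.pyRange 2 ((s.toList.length : Int)+1) 1).foldl
            (pvStepAO s.toList ((s.toList.length : Int)+1))
            (PySem.List.pySetD (PySem.List.pySetD
              (PySem.List.pyRepeat [(s.toList.length : Int)+1] ((s.toList.length : Int)+1)) 0 0) 1 1))
        = (if (((s.toList.length : Int) == 0) = true) then [0] else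
          (PySem.List.pyRange 2 ((s.toList.length : Int)+1) 1).foldl
            (pvStepBO s.toList (s.toList.length : Int)) [0, 1])
    rw [if_neg (by simp only [beq_iff_eq]; omega), if_neg (by simp only [beq_iff_eq]; omega)]
    have hcast : ((s.toList.length - 1 : Nat) : Int) = (s.toList.length : Int) - 1 := by
      omega
    obtain ⟨h1, _⟩ := outer s.toList (s.toList.length : Int) hL1 (s.toList.length - 1 : Nat)
      (by omega)
    rw [show (2 + ((s.toList.length - 1 : Nat) : Int)) = ((s.toList.length : Int) + 1) by omega,
        show (((s.toList.length : Int)) + 1 - ((s.toList.length : Int) + 1)).toNat = 0 by omega] at h1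
    simpa using h1

-- ===== VERDICT (by name: the statement is the Claim_ definition above) =====
theorem find_min_fold_spec : Claim_equal_find_min_fold :=
  fun s _ => ports_agree s
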